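-- pv_equiv track=rewrite | github.com/zhengyanzhao1997/Steam-optimal_distinctiveness-anly | reg_data_process/build_control.py | build_language
-- ===== SOURCE A (Python) =====
-- def build_language(languages):
--     language_lists = ['Arabic','Bulgarian','Czech','Danish','Dutch','English','Finnish','French','German','Greek','Hungarian',
--                       'Italian','Japanese','Korean','Norwegian','Polish','Portuguese',
--                       'Portuguese - Brazil','Romanian','Russian','Simplified Chinese','Slovakian','Spanish - Latin America',
--                       'Spanish - Spain','Swedish','Thai','Traditional Chinese','Turkish','Ukrainian','Vietnamese']
--     language_dict = {str('language_' + x):0 for x in language_lists}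
--     if languages:
--         for lang in languages:
--             if 'language_' + lang in language_dict.keys():
--                 language_dict['language_' + lang] = 1
--     return language_dict
-- ===== SOURCE B (Python) =====
-- def build_language(languages):
--     language_lists = ['Arabic','Bulgarian','Czech','Danish','Dutch','English','Finnish','French','German','Greek','Hungarian',
--                       'Italian','Japanese','Korean','Norwegian','Polish','Portuguese',
--                       'Portuguese - Brazil','Romanian','Russian','Simplified Chinese','Slovakian','Spanish - Latin America',
--                       'Spanish - Spain','Swedish','Thai','Traditional Chinese','Turkish','Ukrainian','Vietnamese']
--     langset = set(languages) if languages else set()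
--     return {'language_' + x: (1 if x in langset else 0) for x in language_lists}
-- ===== Notes on version B (the rewrite author's own statement) =====
-- stated objective: idiomatic
-- what changed: B inverts the traversal: instead of pre-filling a dict with zeros and mutating it while scanning the input list, it builds a set of the input languages once and produces the dict in a single comprehension over the fixed language list, testing set membership.
import Mathlib
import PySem

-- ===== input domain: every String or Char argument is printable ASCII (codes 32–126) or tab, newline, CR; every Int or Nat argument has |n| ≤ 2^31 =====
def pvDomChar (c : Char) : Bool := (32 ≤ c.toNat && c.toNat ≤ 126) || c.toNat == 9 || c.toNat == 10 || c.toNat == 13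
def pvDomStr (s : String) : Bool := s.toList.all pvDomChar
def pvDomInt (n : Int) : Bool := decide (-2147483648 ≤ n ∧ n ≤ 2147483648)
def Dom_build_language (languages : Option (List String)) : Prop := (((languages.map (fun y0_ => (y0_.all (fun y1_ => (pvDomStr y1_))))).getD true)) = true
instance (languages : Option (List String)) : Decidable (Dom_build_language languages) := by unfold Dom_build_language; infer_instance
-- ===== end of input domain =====

-- B inverts the traversal: set of the inputs once, then one map over the fixed language list (idiomatic; same cost).


-- ===== PORT A =====
def pvLangLists : List String :=
  ["Arabic","Bulgarian","Czech","Danish","Dutch","English","Finnish","French","German","Greek","Hungarian",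
   "Italian","Japanese","Korean","Norwegian","Polish","Portuguese",
   "Portuguese - Brazil","Romanian","Russian","Simplified Chinese","Slovakian","Spanish - Latin America",
   "Spanish - Spain","Swedish","Thai","Traditional Chinese","Turkish","Ukrainian","Vietnamese"]

def build_language (languages : Option (List String)) : List (String × Int) :=
  let language_dict : PySem.Dict String Int :=
    PySem.Dict.mk (pvLangLists.map (fun x => ("language_" ++ x, 0)))
  let language_dict :=
    match languages with
    | none => language_dict
    | some ls =>
      if ls.isEmpty then language_dict
      else ls.foldl (fun d lang =>
        if ("language_" ++ lang) ∈ d.keys then d.insert ("language_" ++ lang) 1 else d) language_dict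
  language_dict.items

-- ===== PORT B =====
def build_language_alt (languages : Option (List String)) : List (String × Int) :=
  let langset : PySem.Set String :=
    match languages with
    | none => PySem.Set.ofList []
    | some ls => if ls.isEmpty then PySem.Set.ofList [] else PySem.Set.ofList ls
  pvLangLists.map (fun x => ("language_" ++ x, if x ∈ langset then (1 : Int) else 0))

-- ===== PRECONDITION & SPEC =====
def Spec_build_language (languages : Option (List String)) (out : List (String × Int)) : Prop := out = build_language_alt languages
instance (languages : Option (List String)) (out : List (String × Int)) : Decidable (Spec_build_language languages out) := by unfold Spec_build_language; infer_instance

-- ===== CLAIM (what is proved, stated in full; the proofs are below) =====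
def Claim_equal_build_language : Prop := ∀ (languages : Option (List String)), Dom_build_language languages → Spec_build_language languages (build_language languages)

-- ===== LEMMAS AND PROOFS =====

theorem pv_prefix_inj (p x y : String) (h : p ++ x = p ++ y) : x = y := by
  have hd := congrArg String.toList h
  simp only [String.toList_append] at hd
  exact String.ext (List.append_cancel_left hd)

-- one step of A's loop on a dict whose items are L.map (fun x => ("language_"++x, f x))
theorem pv_step (L : List String) (lang : String) (f : String → Int) :
    (if ("language_" ++ lang) ∈ (PySem.Dict.mk (L.map (fun x => ("language_" ++ x, f x)))).keys
     then (PySem.Dict.mk (L.map (fun x => ("language_" ++ x, f x)))).insert ("language_" ++ lang) 1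
     else PySem.Dict.mk (L.map (fun x => ("language_" ++ x, f x))))
    = PySem.Dict.mk (L.map (fun x => ("language_" ++ x, if x = lang then 1 else f x))) := by
  have hkeys : (PySem.Dict.mk (L.map (fun x => ("language_" ++ x, f x)))).keys
      = L.map (fun x => "language_" ++ x) := by
    simp [PySem.Dict.keys]
  by_cases hmem : lang ∈ L
  · have hin : ("language_" ++ lang) ∈ (PySem.Dict.mk (L.map (fun x => ("language_" ++ x, f x)))).keys := by
      rw [hkeys]; exact List.mem_map_of_mem hmem
    rw [if_pos hin]
    have hcont : (PySem.Dict.mk (L.map (fun x => ("language_" ++ x, f x)))).contains ("language_" ++ lang) = true := by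
      rw [PySem.Dict.contains_iff_mem_keys]; exact hin
    apply PySem.Dict.ext
    rw [PySem.Dict.items_insert_of_contains _ _ hcont]
    show (L.map (fun x => ("language_" ++ x, f x))).map _ = _
    rw [List.map_map]
    apply List.map_congr_left
    intro x hx
    simp only [Function.comp]
    by_cases hxl : x = lang
    · subst hxl; simp
    · have hne : ("language_" ++ x) ≠ ("language_" ++ lang) := fun h => hxl (pv_prefix_inj _ _ _ h)
      simp [hne, hxl]
  · have hnin : ("language_" ++ lang) ∉ (PySem.Dict.mk (L.map (fun x => ("language_" ++ x, f x)))).keys := by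
      rw [hkeys]
      intro h
      obtain ⟨y, hy, hyeq⟩ := List.mem_map.mp h
      exact hmem (pv_prefix_inj _ _ _ hyeq ▸ hy)
    rw [if_neg hnin]
    congr 1
    apply List.map_congr_left
    intro x hx
    have : x ≠ lang := fun h => hmem (h ▸ hx)
    simp [this]

theorem pv_fold (ls : List String) : ∀ (f : String → Int),
    ls.foldl (fun d lang =>
        if ("language_" ++ lang) ∈ PySem.Dict.keys d then d.insert ("language_" ++ lang) 1 else d)
      (PySem.Dict.mk (pvLangLists.map (fun x => ("language_" ++ x, f x))))
    = PySem.Dict.mk (pvLangLists.map (fun x => ("language_" ++ x, if x ∈ ls then 1 else f x))) := by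
  induction ls with
  | nil => intro f; simp
  | cons lang ls ih =>
    intro f
    rw [List.foldl_cons, pv_step pvLangLists lang f, ih]
    congr 1
    apply List.map_congr_left
    intro x hx
    by_cases h1 : x ∈ ls <;> by_cases h2 : x = lang <;> simp [h1, h2]

-- ===== VERDICT (by name: the statement is the Claim_ definition above) =====
theorem build_language_spec : Claim_equal_build_language := by
  intro languages _
  show build_language languages = build_language_alt languages
  unfold build_language build_language_alt
  match languages with
  | none => rfl
  | some ls =>
    by_cases hls : ls.isEmpty
    · simp [hls]
    · simp only [hls]
      rw [pv_fold ls (fun _ => 0)]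
      apply List.map_congr_left
      intro x hx
      by_cases hm : x ∈ ls <;> simp [hm, PySem.Set.mem_ofList]
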